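-- pv_equiv track=rewrite | github.com/yifanzhou106/JavaCoding | PythonCoding/动态规划/将数字拆分的方法数.py | splitNumDp
-- ===== SOURCE A (Python) =====
-- def splitNumDp(N):
--     dp = [[0 for _ in range(N + 1)] for _ in range(N + 1)]
--     for i in range(N + 1):
--         dp[i][0] = 1
--
--     for i in range(N, 0, -1):
--         for j in range(i, N + 1):
--             ways = 0
--             for k in range(i, j + 1):
--                 ways += dp[k][j - k]
--             dp[i][j] = ways
--     return dp[1][-1]
-- ===== SOURCE B (Python) =====
-- def splitNumDp(N):
--     # Flat DP over a single array: dp[j] counts the partitions of j into parts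
--     # no smaller than the current i; each sweep merges the next row in place.
--     dp = [1] + [0] * N
--     for i in range(N, 0, -1):
--         for j in range(i, N + 1):
--             dp[j] += dp[j - i]
--     return dp[N]
-- ===== Notes on version B (the rewrite author's own statement) =====
-- stated objective: faster
-- what changed: Replaced the O(N^3) two-dimensional table whose each cell is an inner summation over the smallest part with a single flat array updated in place by the recurrence dp[j] += dp[j-i], eliminating both the table of rows and the inner summation loop.
import Mathlib
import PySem

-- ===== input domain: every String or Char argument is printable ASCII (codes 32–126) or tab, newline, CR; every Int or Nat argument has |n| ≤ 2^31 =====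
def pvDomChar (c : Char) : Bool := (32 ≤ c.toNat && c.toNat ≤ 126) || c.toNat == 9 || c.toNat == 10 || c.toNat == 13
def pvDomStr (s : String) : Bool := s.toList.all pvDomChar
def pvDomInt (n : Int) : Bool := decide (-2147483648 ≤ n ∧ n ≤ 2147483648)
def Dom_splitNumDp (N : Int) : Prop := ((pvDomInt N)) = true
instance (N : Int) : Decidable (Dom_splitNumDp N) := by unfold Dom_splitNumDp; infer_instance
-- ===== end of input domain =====

-- B replaces A's cubic-time table of rows (each cell an inner sum over the smallest
-- part) by a single flat array updated in place: asymptotically faster.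

-- ===== PORT A =====
-- literal transliteration of A; list indices in the loops are provably nonnegative,
-- so pyGetD/pySetD are exact there; the final negative-index read is exact under Pre_.
def splitNumDp (N : Int) : Int :=
  let dp : List (List Int) :=
    (PySem.List.pyRange 0 (N + 1) 1).map (fun _ =>
      (PySem.List.pyRange 0 (N + 1) 1).map (fun _ => (0 : Int)))
  let dp := (PySem.List.pyRange 0 (N + 1) 1).foldl
    (fun dp i => PySem.List.pySetD dp i (PySem.List.pySetD (PySem.List.pyGetD dp i []) 0 1)) dp
  -- 'ways' is the inner accumulation loop, written inline as its foldl
  let dp := (PySem.List.pyRange N 0 (-1)).foldl (fun dp i =>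
    (PySem.List.pyRange i (N + 1) 1).foldl (fun dp j =>
      PySem.List.pySetD dp i (PySem.List.pySetD (PySem.List.pyGetD dp i []) j
        ((PySem.List.pyRange i (j + 1) 1).foldl
          (fun w k => w + PySem.List.pyGetD (PySem.List.pyGetD dp k []) (j - k) 0) 0))) dp) dp
  PySem.List.pyGetD (PySem.List.pyGetD dp 1 []) (-1) 0

-- ===== PORT B =====
-- literal transliteration of Source B ([1] + [0]*N clamps at 0 exactly like Python).
def splitNumDp_alt (N : Int) : Int :=
  let dp : List Int := 1 :: List.replicate N.toNat 0
  let dp := (PySem.List.pyRange N 0 (-1)).foldl (fun dp i =>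
    (PySem.List.pyRange i (N + 1) 1).foldl (fun dp j =>
      PySem.List.pySetD dp j
        (PySem.List.pyGetD dp j 0 + PySem.List.pyGetD dp (j - i) 0)) dp) dp
  PySem.List.pyGetD dp N 0

-- ===== PRECONDITION & SPEC =====
-- Pre_ excludes exactly the non-positive N, on all of which A raises IndexError
-- (the table has no row holding the answer there).
def Pre_splitNumDp (N : Int) : Prop := 1 ≤ N
instance (N : Int) : Decidable (Pre_splitNumDp N) := by unfold Pre_splitNumDp; infer_instance
def pvWitness_splitNumDp : Int := 6
def Spec_splitNumDp (N : Int) (out : Int) : Prop := out = splitNumDp_alt N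
instance (N : Int) (out : Int) : Decidable (Spec_splitNumDp N out) := by unfold Spec_splitNumDp; infer_instance

-- ===== CLAIM (what is proved, stated in full; the proofs are below) =====
def Claim_equal_splitNumDp : Prop :=
  ∀ (N : Int), Dom_splitNumDp N → Pre_splitNumDp N → Spec_splitNumDp N (splitNumDp N)

-- ===== LEMMAS AND PROOFS =====

-- pvP i n = number of partitions of n into parts ≥ i (0 for n < 0 or i ≤ 0 with n ≠ 0).
def pvP (i n : Int) : Int :=
  if n = 0 then 1
  else if n < 0 ∨ i ≤ 0 ∨ n < i then 0
  else pvP i (n - i) + pvP (i + 1) n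
termination_by (n.toNat, (n + 1 - i).toNat)
decreasing_by all_goals (simp_wf; omega)

theorem pvP_zero (i : Int) : pvP i 0 = 1 := by
  rw [pvP]; simp

theorem pvP_small {i n : Int} (h0 : 0 < n) (h : n < i) : pvP i n = 0 := by
  rw [pvP]
  rw [if_neg (by omega), if_pos (by omega)]

theorem pvP_rec {i n : Int} (hi : 1 ≤ i) (hn : i ≤ n) :
    pvP i n = pvP i (n - i) + pvP (i + 1) n := by
  rw [pvP]
  rw [if_neg (by omega), if_neg (by omega)]

theorem pvP_below {i m : Int} (h0 : 0 ≤ m) (h : m < i) : pvP i m = pvP (i + 1) m := by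
  rcases eq_or_lt_of_le h0 with h0 | h0
  · rw [← h0, pvP_zero, pvP_zero]
  · rw [pvP_small h0 h, pvP_small h0 (by omega)]

-- getD/setD exchange for nonnegative indices (both sides default when out of range)
theorem pv_getD_setD {α : Type} (xs : List α) (d : α) (n m : Int) (v : α)
    (hn0 : 0 ≤ n) (_hn : n < (xs.length : Int)) (hm0 : 0 ≤ m) (hm : m < (xs.length : Int)) :
    PySem.List.pyGetD (PySem.List.pySetD xs n v) m d
      = if m = n then v else PySem.List.pyGetD xs m d := by
  rw [PySem.List.pySetD_of_nonneg xs v hn0]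
  rw [PySem.List.pyGetD_eq_getElem _ d hm0 (by simpa using hm),
      PySem.List.pyGetD_eq_getElem _ d hm0 hm]
  rw [List.getElem_set]
  split_ifs with h1 h2 h3 <;> try rfl
  · exact absurd (by omega : m = n) h2
  · exact absurd (by omega : n.toNat = m.toNat) h1

theorem pv_foldl_congr {α β : Type} (l : List β) (f g : α → β → α) :
    ∀ (a : α), (∀ x ∈ l, ∀ acc, f acc x = g acc x) → l.foldl f a = l.foldl g a := by
  induction l with
  | nil => intro a _; rfl
  | cons x t ih =>
      intro a h
      simp only [List.foldl_cons]
      rw [h x (by simp)]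
      exact ih _ (fun y hy acc => h y (by simp [hy]) acc)

theorem pv_sum_pvP (j : Int) : ∀ (d : Nat) (i c : Int), 1 ≤ i → i ≤ j → (j - i).toNat = d →
    (PySem.List.pyRange i (j + 1) 1).foldl (fun w k => w + pvP k (j - k)) c = c + pvP i j := by
  intro d
  induction d with
  | zero =>
      intro i c hi hij hd
      have hij' : i = j := by omega
      subst hij'
      rw [PySem.List.pyRange_one_cons (by omega), PySem.List.pyRange_one_eq_nil (by omega)]
      simp only [List.foldl_cons, List.foldl_nil, sub_self]
      rw [pvP_rec hi le_rfl, sub_self, pvP_zero, pvP_small (i := i + 1) (by omega) (by omega)]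
      ring
  | succ d ih =>
      intro i c hi hij hd
      have hlt : i < j := by omega
      rw [PySem.List.pyRange_one_cons (by omega)]
      simp only [List.foldl_cons]
      rw [ih (i + 1) (c + pvP i (j - i)) (by omega) (by omega) (by omega)]
      rw [pvP_rec hi (le_of_lt hlt)]
      ring

theorem pvB_inner (N i : Int) (hi : 1 ≤ i) (_hiN : i ≤ N) :
    ∀ (d : Nat) (j : Int) (dp : List Int), i ≤ j → j ≤ N + 1 → (N + 1 - j).toNat = d →
    (dp.length : Int) = N + 1 →
    (∀ m : Int, 0 ≤ m → m ≤ N →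
      PySem.List.pyGetD dp m 0 = if m < j then pvP i m else pvP (i + 1) m) →
    (((PySem.List.pyRange j (N + 1) 1).foldl (fun dp j =>
        PySem.List.pySetD dp j
          (PySem.List.pyGetD dp j 0 + PySem.List.pyGetD dp (j - i) 0)) dp).length : Int) = N + 1 ∧
    (∀ m : Int, 0 ≤ m → m ≤ N →
      PySem.List.pyGetD ((PySem.List.pyRange j (N + 1) 1).foldl (fun dp j =>
        PySem.List.pySetD dp j
          (PySem.List.pyGetD dp j 0 + PySem.List.pyGetD dp (j - i) 0)) dp) m 0 = pvP i m) := by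
  intro d
  induction d with
  | zero =>
      intro j dp hj1 hj2 hd hlen hval
      rw [PySem.List.pyRange_one_eq_nil (by omega)]
      simp only [List.foldl_nil]
      refine ⟨hlen, fun m hm0 hmN => ?_⟩
      rw [hval m hm0 hmN, if_pos (by omega)]
  | succ d ih =>
      intro j dp hj1 hj2 hd hlen hval
      have hjN : j ≤ N := by omega
      rw [PySem.List.pyRange_one_cons (by omega)]
      simp only [List.foldl_cons]
      have hgj : PySem.List.pyGetD dp j 0 = pvP (i + 1) j := by
        rw [hval j (by omega) hjN, if_neg (by omega)]
      have hgji : PySem.List.pyGetD dp (j - i) 0 = pvP i (j - i) := by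
        rw [hval (j - i) (by omega) (by omega), if_pos (by omega)]
      have hlen' : ((PySem.List.pySetD dp j
          (PySem.List.pyGetD dp j 0 + PySem.List.pyGetD dp (j - i) 0)).length : Int) = N + 1 := by
        rw [PySem.List.length_pySetD]; exact hlen
      have e1 : i ≤ j + 1 := by omega
      have e2 : j + 1 ≤ N + 1 := by omega
      have e3 : (N + 1 - (j + 1)).toNat = d := by omega
      refine ih (j + 1) _ e1 e2 e3 hlen' ?_
      intro m hm0 hmN
      have hjlen : j < (dp.length : Int) := by omega
      have hmlen : m < (dp.length : Int) := by omega
      rw [pv_getD_setD dp 0 j m (PySem.List.pyGetD dp j 0 + PySem.List.pyGetD dp (j - i) 0)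
        (by omega) hjlen hm0 hmlen]
      by_cases hmj : m = j
      · have hj : m < j + 1 := by omega
        rw [if_pos hmj, if_pos hj, hgj, hgji, hmj, pvP_rec (i := i) (n := j) hi (by omega)]
        ring
      · rw [if_neg hmj, hval m hm0 hmN]
        by_cases hlt : m < j
        · rw [if_pos hlt, if_pos (by omega)]
        · rw [if_neg hlt, if_neg (by omega)]

theorem pvB_outer (N : Int) :
    ∀ (d : Nat) (i : Int) (dp : List Int), 0 ≤ i → i ≤ N → i.toNat = d →
    (dp.length : Int) = N + 1 →
    (∀ m : Int, 0 ≤ m → m ≤ N → PySem.List.pyGetD dp m 0 = pvP (i + 1) m) →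
    (∀ m : Int, 0 ≤ m → m ≤ N →
      PySem.List.pyGetD ((PySem.List.pyRange i 0 (-1)).foldl (fun dp i =>
        (PySem.List.pyRange i (N + 1) 1).foldl (fun dp j =>
          PySem.List.pySetD dp j
            (PySem.List.pyGetD dp j 0 + PySem.List.pyGetD dp (j - i) 0)) dp) dp) m 0
        = pvP 1 m) := by
  intro d
  induction d with
  | zero =>
      intro i dp hi0 hiN hd hlen hval
      have : i = 0 := by omega
      subst this
      rw [PySem.List.pyRange_neg_one_eq_nil (by omega)]
      simpa using hval
  | succ d ih =>
      intro i dp hi0 hiN hd hlen hval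
      have hi1 : 1 ≤ i := by omega
      rw [PySem.List.pyRange_neg_one_cons (by omega)]
      simp only [List.foldl_cons]
      have hinner := pvB_inner N i hi1 (le_trans (by omega) hiN) ((N + 1 - i).toNat) i dp le_rfl (by omega) rfl hlen ?hv
      case hv =>
        intro m hm0 hmN
        by_cases hlt : m < i
        · rw [if_pos hlt, hval m hm0 hmN, ← pvP_below hm0 hlt]
        · rw [if_neg hlt, hval m hm0 hmN]
      have e1 : (0:Int) ≤ i - 1 := by omega
      have e2 : i - 1 ≤ N := by omega
      have e3 : (i - 1).toNat = d := by omega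
      refine ih (i - 1) _ e1 e2 e3 hinner.1 ?_
      intro m hm0 hmN
      rw [hinner.2 m hm0 hmN]
      congr 1
      omega

theorem splitNumDp_alt_eq_pvP {N : Int} (hN : 1 ≤ N) : splitNumDp_alt N = pvP 1 N := by
  unfold splitNumDp_alt
  have hlen : (((1 : Int) :: List.replicate N.toNat (0 : Int)).length : Int) = N + 1 := by
    simp; omega
  have hval : ∀ m : Int, 0 ≤ m → m ≤ N →
      PySem.List.pyGetD ((1 : Int) :: List.replicate N.toNat (0 : Int)) m 0 = pvP (N + 1) m := by
    intro m hm0 hmN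
    rw [PySem.List.pyGetD_eq_getElem _ _ hm0 (by rw [hlen]; omega)]
    rcases Nat.eq_zero_or_pos m.toNat with h | h
    · have : m = 0 := by omega
      subst this
      simp [pvP_zero]
    · have hm1 : 0 < m := by omega
      have : m.toNat = (m.toNat - 1) + 1 := by omega
      rw [pvP_small hm1 (by omega)]
      rw [List.getElem_cons]
      split_ifs with h0
      · omega
      · rw [List.getElem_replicate]
  have := pvB_outer N N.toNat N _ (by omega) le_rfl rfl hlen hval N (by omega) le_rfl
  simpa [PySem.List.pyGetD] using this

-- ----- A-side: table invariants -----

def pvC (dp : List (List Int)) (r c : Int) : Int :=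
  PySem.List.pyGetD (PySem.List.pyGetD dp r []) c 0

def pvTbl (N : Int) (dp : List (List Int)) : Prop :=
  (dp.length : Int) = N + 1 ∧
  ∀ r : Int, 0 ≤ r → r ≤ N → ((PySem.List.pyGetD dp r []).length : Int) = N + 1

theorem pvRow_set (N : Int) (dp : List (List Int)) (i : Int) (row : List Int) (r : Int)
    (h : pvTbl N dp) (hi0 : 0 ≤ i) (hiN : i ≤ N) (hr0 : 0 ≤ r) (hrN : r ≤ N) :
    PySem.List.pyGetD (PySem.List.pySetD dp i row) r []
      = if r = i then row else PySem.List.pyGetD dp r [] := by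
  obtain ⟨h1, _⟩ := h
  exact pv_getD_setD dp [] i r row hi0 (by omega) hr0 (by omega)

theorem pvTbl_set (N : Int) (dp : List (List Int)) (i j : Int) (v : Int)
    (h : pvTbl N dp) (hi0 : 0 ≤ i) (hiN : i ≤ N) :
    pvTbl N (PySem.List.pySetD dp i
      (PySem.List.pySetD (PySem.List.pyGetD dp i []) j v)) := by
  refine ⟨by rw [PySem.List.length_pySetD]; exact h.1, fun r hr0 hrN => ?_⟩
  rw [pvRow_set N dp i _ r h hi0 hiN hr0 hrN]
  by_cases hri : r = i
  · rw [if_pos hri, PySem.List.length_pySetD]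
    exact h.2 i hi0 hiN
  · rw [if_neg hri]
    exact h.2 r hr0 hrN

theorem pvC_set (N : Int) (dp : List (List Int)) (i j : Int) (v : Int) (r c : Int)
    (h : pvTbl N dp) (hi0 : 0 ≤ i) (hiN : i ≤ N) (hj0 : 0 ≤ j) (hjN : j ≤ N)
    (hr0 : 0 ≤ r) (hrN : r ≤ N) (hc0 : 0 ≤ c) (hcN : c ≤ N) :
    pvC (PySem.List.pySetD dp i
      (PySem.List.pySetD (PySem.List.pyGetD dp i []) j v)) r c
      = if r = i ∧ c = j then v else pvC dp r c := by
  unfold pvC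
  rw [pvRow_set N dp i _ r h hi0 hiN hr0 hrN]
  by_cases hri : r = i
  · rw [if_pos hri]
    have hrow : ((PySem.List.pyGetD dp i []).length : Int) = N + 1 := h.2 i hi0 hiN
    rw [pv_getD_setD _ 0 j c v hj0 (by omega) hc0 (by omega)]
    by_cases hcj : c = j
    · rw [if_pos hcj, if_pos ⟨hri, hcj⟩]
    · rw [if_neg hcj, if_neg (fun hh => hcj hh.2), hri]
  · rw [if_neg hri, if_neg (fun hh => hri hh.1)]

-- the value of a cell during A's sweeps: rows above i done, row i done up to column j
def pvF (i j r c : Int) : Int :=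
  if i < r then pvP r c
  else if r = i then (if c < j then pvP i c else if c = 0 then 1 else 0)
  else (if c = 0 then 1 else 0)

theorem pvA_init (N : Int) (_hN : 1 ≤ N) :
    ∀ (d : Nat) (t : Int) (dp : List (List Int)), 0 ≤ t → t ≤ N + 1 → (N + 1 - t).toNat = d →
    pvTbl N dp →
    (∀ r c : Int, 0 ≤ r → r ≤ N → 0 ≤ c → c ≤ N →
      pvC dp r c = if r < t ∧ c = 0 then 1 else 0) →
    pvTbl N ((PySem.List.pyRange t (N + 1) 1).foldl
      (fun dp i => PySem.List.pySetD dp i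
        (PySem.List.pySetD (PySem.List.pyGetD dp i []) 0 1)) dp) ∧
    (∀ r c : Int, 0 ≤ r → r ≤ N → 0 ≤ c → c ≤ N →
      pvC ((PySem.List.pyRange t (N + 1) 1).foldl
        (fun dp i => PySem.List.pySetD dp i
          (PySem.List.pySetD (PySem.List.pyGetD dp i []) 0 1)) dp) r c
        = if c = 0 then 1 else 0) := by
  intro d
  induction d with
  | zero =>
      intro t dp ht0 ht1 hd htbl hval
      rw [PySem.List.pyRange_one_eq_nil (by omega)]
      simp only [List.foldl_nil]
      refine ⟨htbl, fun r c hr0 hrN hc0 hcN => ?_⟩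
      rw [hval r c hr0 hrN hc0 hcN]
      by_cases hc : c = 0
      · rw [if_pos ⟨by omega, hc⟩, if_pos hc]
      · rw [if_neg (fun hh => hc hh.2), if_neg hc]
  | succ d ih =>
      intro t dp ht0 ht1 hd htbl hval
      have htN : t ≤ N := by omega
      rw [PySem.List.pyRange_one_cons (by omega)]
      simp only [List.foldl_cons]
      have e3 : (N + 1 - (t + 1)).toNat = d := by omega
      refine ih (t + 1) _ (by omega) (by omega) e3
        (pvTbl_set N dp t 0 1 htbl ht0 htN) ?_
      intro r c hr0 hrN hc0 hcN
      rw [pvC_set N dp t 0 1 r c htbl ht0 htN le_rfl (by omega) hr0 hrN hc0 hcN]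
      rw [hval r c hr0 hrN hc0 hcN]
      by_cases hc : c = 0
      · by_cases hrt : r = t
        · rw [if_pos ⟨hrt, hc⟩, if_pos ⟨by omega, hc⟩]
        · rw [if_neg (fun hh => hrt hh.1)]
          by_cases hlt : r < t
          · rw [if_pos ⟨hlt, hc⟩, if_pos ⟨by omega, hc⟩]
          · rw [if_neg (fun hh => hlt hh.1), if_neg (fun hh => by omega)]
      · rw [if_neg (fun hh => hc hh.2), if_neg (fun hh => hc hh.2),
            if_neg (fun hh => hc hh.2)]

theorem pvA_inner (N i : Int) (_hN : 1 ≤ N) (hi : 1 ≤ i) (hiN : i ≤ N) :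
    ∀ (d : Nat) (j : Int) (dp : List (List Int)), i ≤ j → j ≤ N + 1 → (N + 1 - j).toNat = d →
    pvTbl N dp →
    (∀ r c : Int, 0 ≤ r → r ≤ N → 0 ≤ c → c ≤ N → pvC dp r c = pvF i j r c) →
    pvTbl N ((PySem.List.pyRange j (N + 1) 1).foldl
      (fun dp j => PySem.List.pySetD dp i (PySem.List.pySetD (PySem.List.pyGetD dp i []) j
        ((PySem.List.pyRange i (j + 1) 1).foldl
          (fun w k => w + PySem.List.pyGetD (PySem.List.pyGetD dp k []) (j - k) 0) 0))) dp) ∧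
    (∀ r c : Int, 0 ≤ r → r ≤ N → 0 ≤ c → c ≤ N →
      pvC ((PySem.List.pyRange j (N + 1) 1).foldl
        (fun dp j => PySem.List.pySetD dp i (PySem.List.pySetD (PySem.List.pyGetD dp i []) j
          ((PySem.List.pyRange i (j + 1) 1).foldl
            (fun w k => w + PySem.List.pyGetD (PySem.List.pyGetD dp k []) (j - k) 0) 0))) dp)
        r c = pvF i (N + 1) r c) := by
  intro d
  induction d with
  | zero =>
      intro j dp hj1 hj2 hd htbl hval
      have hj : j = N + 1 := by omega
      subst hj
      rw [PySem.List.pyRange_one_eq_nil (by omega)]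
      simp only [List.foldl_nil]
      exact ⟨htbl, hval⟩
  | succ d ih =>
      intro j dp hj1 hj2 hd htbl hval
      have hjN : j ≤ N := by omega
      rw [PySem.List.pyRange_one_cons (by omega)]
      simp only [List.foldl_cons]
      -- the inner summation computes pvP i j
      have hways : (PySem.List.pyRange i (j + 1) 1).foldl
          (fun w k => w + PySem.List.pyGetD (PySem.List.pyGetD dp k []) (j - k) 0) 0
          = pvP i j := by
        rw [pv_foldl_congr (PySem.List.pyRange i (j + 1) 1)
          (fun w k => w + PySem.List.pyGetD (PySem.List.pyGetD dp k []) (j - k) 0)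
          (fun w k => w + pvP k (j - k)) 0 ?_]
        · rw [pv_sum_pvP j (j - i).toNat i 0 hi hj1 rfl]; ring
        · intro k hk acc
          dsimp only
          rw [PySem.List.mem_pyRange_one] at hk
          have hcell : pvC dp k (j - k) = pvP k (j - k) := by
            rw [hval k (j - k) (by omega) (by omega) (by omega) (by omega)]
            unfold pvF
            by_cases hik : i < k
            · rw [if_pos hik]
            · have hk' : k = i := by omega
              rw [if_neg hik, if_pos hk', if_pos (by omega), hk']
          unfold pvC at hcell
          rw [hcell]
      rw [hways]
      have e3 : (N + 1 - (j + 1)).toNat = d := by omega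
      refine ih (j + 1) _ (by omega) (by omega) e3
        (pvTbl_set N dp i j _ htbl (by omega) hiN) ?_
      intro r c hr0 hrN hc0 hcN
      rw [pvC_set N dp i j _ r c htbl (by omega) hiN (by omega) hjN hr0 hrN hc0 hcN]
      rw [hval r c hr0 hrN hc0 hcN]
      unfold pvF
      by_cases hir : i < r
      · rw [if_neg (show ¬(r = i ∧ c = j) by omega), if_pos hir, if_pos hir]
      · rw [if_neg hir, if_neg hir]
        by_cases hri : r = i
        · rw [if_pos hri, if_pos hri]
          by_cases hcj : c = j
          · rw [if_pos ⟨hri, hcj⟩, if_pos (show c < j + 1 by omega), hcj]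
          · rw [if_neg (fun hh => hcj hh.2)]
            by_cases hlt : c < j
            · rw [if_pos hlt, if_pos (show c < j + 1 by omega)]
            · rw [if_neg hlt, if_neg (show ¬ c < j + 1 by omega)]
        · rw [if_neg (fun hh => hri hh.1), if_neg hri, if_neg hri]

theorem pvA_outer (N : Int) (hN : 1 ≤ N) :
    ∀ (d : Nat) (i : Int) (dp : List (List Int)), 0 ≤ i → i ≤ N → i.toNat = d →
    pvTbl N dp →
    (∀ r c : Int, 0 ≤ r → r ≤ N → 0 ≤ c → c ≤ N →
      pvC dp r c = if i < r then pvP r c else if c = 0 then 1 else 0) →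
    pvTbl N ((PySem.List.pyRange i 0 (-1)).foldl (fun dp i =>
      (PySem.List.pyRange i (N + 1) 1).foldl
        (fun dp j => PySem.List.pySetD dp i (PySem.List.pySetD (PySem.List.pyGetD dp i []) j
          ((PySem.List.pyRange i (j + 1) 1).foldl
            (fun w k => w + PySem.List.pyGetD (PySem.List.pyGetD dp k []) (j - k) 0) 0))) dp) dp) ∧
    (∀ r c : Int, 0 ≤ r → r ≤ N → 0 ≤ c → c ≤ N →
      pvC ((PySem.List.pyRange i 0 (-1)).foldl (fun dp i =>
        (PySem.List.pyRange i (N + 1) 1).foldl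
          (fun dp j => PySem.List.pySetD dp i (PySem.List.pySetD (PySem.List.pyGetD dp i []) j
            ((PySem.List.pyRange i (j + 1) 1).foldl
              (fun w k => w + PySem.List.pyGetD (PySem.List.pyGetD dp k []) (j - k) 0) 0))) dp) dp)
        r c = if 0 < r then pvP r c else if c = 0 then 1 else 0) := by
  intro d
  induction d with
  | zero =>
      intro i dp hi0 hiN hd htbl hval
      have : i = 0 := by omega
      subst this
      rw [PySem.List.pyRange_neg_one_eq_nil (by omega)]
      simp only [List.foldl_nil]
      exact ⟨htbl, hval⟩
  | succ d ih =>
      intro i dp hi0 hiN hd htbl hval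
      have hi1 : 1 ≤ i := by omega
      rw [PySem.List.pyRange_neg_one_cons (by omega)]
      simp only [List.foldl_cons]
      have hinner := pvA_inner N i hN hi1 hiN ((N + 1 - i).toNat) i dp le_rfl (by omega)
        rfl htbl ?hv
      case hv =>
        intro r c hr0 hrN hc0 hcN
        rw [hval r c hr0 hrN hc0 hcN]
        unfold pvF
        by_cases hir : i < r
        · rw [if_pos hir, if_pos hir]
        · rw [if_neg hir, if_neg hir]
          by_cases hri : r = i
          · rw [if_pos hri]
            by_cases hlt : c < i
            · rw [if_pos hlt]
              rcases eq_or_lt_of_le hc0 with hc | hc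
              · rw [← hc, pvP_zero, if_pos rfl]
              · rw [pvP_small hc (by omega), if_neg (by omega)]
            · rw [if_neg hlt]
          · rw [if_neg hri]
      have e3 : (i - 1).toNat = d := by omega
      refine ih (i - 1) _ (by omega) (by omega) e3 hinner.1 ?_
      intro r c hr0 hrN hc0 hcN
      rw [hinner.2 r c hr0 hrN hc0 hcN]
      unfold pvF
      by_cases hir : i < r
      · rw [if_pos hir, if_pos (show i - 1 < r by omega)]
      · rw [if_neg hir]
        by_cases hri : r = i
        · rw [if_pos hri, if_pos (show c < N + 1 by omega),
              if_pos (show i - 1 < r by omega), hri]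
        · rw [if_neg hri, if_neg (show ¬ i - 1 < r by omega)]

theorem pv_last_eq (xs : List Int) (N : Int) (hlen : (xs.length : Int) = N + 1)
    (hN : 1 ≤ N) : PySem.List.pyGetD xs (-1) 0 = PySem.List.pyGetD xs N 0 := by
  rw [PySem.List.pyGetD_neg_ofNat xs 1 0 (by omega) (by omega),
      PySem.List.pyGetD_eq_getElem _ _ (by omega) (by omega)]
  congr 1
  omega

theorem splitNumDp_eq_pvP {N : Int} (hN : 1 ≤ N) : splitNumDp N = pvP 1 N := by
  unfold splitNumDp
  dsimp only
  set row0 : List Int := (PySem.List.pyRange 0 (N + 1) 1).map (fun _ => (0 : Int)) with hrow0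
  have hrow0len : (row0.length : Int) = N + 1 := by
    rw [hrow0, List.length_map, PySem.List.length_pyRange_one]; omega
  set dp0 : List (List Int) := (PySem.List.pyRange 0 (N + 1) 1).map (fun _ => row0) with hdp0
  have hdp0len : (dp0.length : Int) = N + 1 := by
    rw [hdp0, List.length_map, PySem.List.length_pyRange_one]; omega
  have hrow : ∀ r : Int, 0 ≤ r → r ≤ N → PySem.List.pyGetD dp0 r [] = row0 := by
    intro r hr0 hrN
    rw [PySem.List.pyGetD_eq_getElem _ _ hr0 (by omega)]
    simp only [hdp0, List.getElem_map]
  have htbl0 : pvTbl N dp0 := by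
    refine ⟨hdp0len, fun r hr0 hrN => ?_⟩
    rw [hrow r hr0 hrN]; exact hrow0len
  have hval0 : ∀ r c : Int, 0 ≤ r → r ≤ N → 0 ≤ c → c ≤ N →
      pvC dp0 r c = if r < 0 ∧ c = 0 then 1 else 0 := by
    intro r c hr0 hrN hc0 hcN
    unfold pvC
    rw [hrow r hr0 hrN, PySem.List.pyGetD_eq_getElem _ _ hc0 (by omega)]
    simp only [hrow0, List.getElem_map]
    rw [if_neg (show ¬(r < 0 ∧ c = 0) by omega)]
  have hinit := pvA_init N hN ((N + 1).toNat) 0 dp0 le_rfl (by omega) (by omega) htbl0 hval0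
  have hmain := pvA_outer N hN N.toNat N _ (by omega) le_rfl rfl hinit.1 ?hv
  case hv =>
    intro r c hr0 hrN hc0 hcN
    rw [hinit.2 r c hr0 hrN hc0 hcN, if_neg (show ¬ N < r by omega)]
  obtain ⟨⟨hlen2, hrows2⟩, hvals2⟩ := hmain
  have hrow1 := hrows2 1 (by omega) (by omega)
  have hfin := hvals2 1 N (by omega) (by omega) (by omega) le_rfl
  rw [if_pos (show (0:Int) < 1 by omega)] at hfin
  unfold pvC at hfin
  rw [pv_last_eq _ N hrow1 hN, hfin]

-- ===== VERDICT (by name: the statement is the Claim_ definition above) =====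
theorem splitNumDp_spec : Claim_equal_splitNumDp := by
  intro N _ hPre
  unfold Spec_splitNumDp
  rw [splitNumDp_eq_pvP hPre, splitNumDp_alt_eq_pvP hPre]
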